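-- pv_equiv track=rewrite | github.com/smenaaliaga/bc_pibot | orchestrator/data/_helpers.py | has_full_quarterly_year
-- ===== SOURCE A (Python) =====
-- from typing import Any, Dict, List, Optional, Tuple
--
-- def quarter_from_date(value: Any) -> Optional[Tuple[int, int]]:
--     """Extrae (año, trimestre) de una fecha ISO."""
--     date_text = str(value or "").strip()
--     if not date_text:
--         return None
--     try:
--         parts = date_text[:10].split("-")
--         if len(parts) != 3:
--             return None
--         year = int(parts[0])
--         month = int(parts[1])
--         if month < 1 or month > 12:
--             return None
--         quarter = ((month - 1) // 3) + 1
--         return year, quarter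
--     except Exception:
--         return None
--
-- def has_full_quarterly_year(
--     observations: List[Dict[str, Any]], year: int
-- ) -> bool:
--     """Verifica si existen los 4 trimestres de un año en las observaciones."""
--     quarters: set[int] = set()
--     for row in observations or []:
--         if not isinstance(row, dict):
--             continue
--         qk = quarter_from_date(row.get("date"))
--         if qk is None:
--             continue
--         row_year, row_quarter = qk
--         if row_year == year:
--             quarters.add(row_quarter)
--     return len(quarters) == 4
-- ===== SOURCE B (Python) =====
-- from typing import Any, Dict, List, Optional, Tuple
--
-- def quarter_from_date(value: Any) -> Optional[Tuple[int, int]]: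
--     """Extrae (año, trimestre) de una fecha ISO."""
--     date_text = str(value or "").strip()
--     if not date_text:
--         return None
--     try:
--         parts = date_text[:10].split("-")
--         if len(parts) != 3:
--             return None
--         year = int(parts[0])
--         month = int(parts[1])
--         if month < 1 or month > 12:
--             return None
--         quarter = ((month - 1) // 3) + 1
--         return year, quarter
--     except Exception:
--         return None
--
-- def has_full_quarterly_year(observations, year):
--     """Verifica si existen los 4 trimestres de un año en las observaciones."""
--     return all(
--         any(
--             isinstance(row, dict)
--             and quarter_from_date(row.get("date")) == (year, q)
--             for row in (observations or [])
--         )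
--         for q in (1, 2, 3, 4)
--     )
-- ===== Notes on version B (the rewrite author's own statement) =====
-- stated objective: alternative
-- what changed: B replaces A's single pass that accumulates a set of seen quarters (then tests its size) with four independent existence scans, one per required quarter, expressing 'all four quarters present' directly as all(any(...)).
import Mathlib
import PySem

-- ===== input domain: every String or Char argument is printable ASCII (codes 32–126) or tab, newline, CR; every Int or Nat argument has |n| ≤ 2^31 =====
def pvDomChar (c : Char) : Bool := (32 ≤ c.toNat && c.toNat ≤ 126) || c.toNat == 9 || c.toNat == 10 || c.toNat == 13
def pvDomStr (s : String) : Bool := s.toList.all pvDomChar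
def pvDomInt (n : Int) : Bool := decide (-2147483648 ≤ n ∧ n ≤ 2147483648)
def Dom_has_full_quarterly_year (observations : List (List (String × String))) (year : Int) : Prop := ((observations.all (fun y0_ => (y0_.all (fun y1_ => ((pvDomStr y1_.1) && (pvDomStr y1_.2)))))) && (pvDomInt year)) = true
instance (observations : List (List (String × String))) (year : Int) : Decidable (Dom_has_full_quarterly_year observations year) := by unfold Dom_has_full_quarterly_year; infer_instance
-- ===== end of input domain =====

-- B replaces A's single pass accumulating a set of seen quarters (then testing its size)
-- with four independent existence scans, one per required quarter (objective: alternative).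

-- ===== PORT A =====
-- quarter_from_date(value): shared helper, used by both ports (it is identical in Source A and Source B)
def quarter_from_date (value : Option String) : Option (Int × Int) :=
  -- str(value or "").strip(): value is row.get("date"); None or "" both give "";
  -- strings are handled on the code-point side (PySem.Chars), exact on the ASCII domain
  let date_text := PySem.Chars.strip (value.getD "").toList
  if date_text = [] then none
  else
    -- date_text[:10].split("-"); splitOn is exact for a nonempty separator
    let parts := PySem.Chars.splitOn (PySem.Chars.slice date_text none (some 10)) ['-']
    if parts.length ≠ 3 then none
    else
      -- int(parts[0]) / int(parts[1]); ValueError (none) → except → None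
      match PySem.Int.ofChars? parts[0]! with
      | none => none
      | some year =>
        match PySem.Int.ofChars? parts[1]! with
        | none => none
        | some month =>
          if month < 1 ∨ month > 12 then none
          else some (year, PySem.Int.floordiv (month - 1) 3 + 1)

def has_full_quarterly_year (observations : List (List (String × String))) (year : Int) : Bool :=
  -- quarters = set(); for row in observations: … quarters.add(row_quarter); len(quarters) == 4
  let quarters : PySem.Set Int :=
    observations.foldl
      (fun quarters row =>
        match quarter_from_date ((PySem.Dict.mk row).get? "date") with
        | none => quarters
        | some (row_year, row_quarter) =>
          if row_year == year then PySem.Set.add quarters row_quarter else quarters)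
      PySem.Set.empty
  PySem.Set.len quarters == 4

-- ===== PORT B =====
def has_full_quarterly_year_alt (observations : List (List (String × String))) (year : Int) : Bool :=
  -- all(any(quarter_from_date(row.get("date")) == (year, q) for row in observations) for q in (1,2,3,4))
  [(1 : Int), 2, 3, 4].all (fun q =>
    observations.any (fun row =>
      quarter_from_date ((PySem.Dict.mk row).get? "date") == some (year, q)))

-- ===== PRECONDITION & SPEC =====
def Spec_has_full_quarterly_year (observations : List (List (String × String))) (year : Int) (out : Bool) : Prop := out = has_full_quarterly_year_alt observations year
instance (observations : List (List (String × String))) (year : Int) (out : Bool) : Decidable (Spec_has_full_quarterly_year observations year out) := by unfold Spec_has_full_quarterly_year; infer_instance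

-- ===== CLAIM (what is proved, stated in full; the proofs are below) =====
def Claim_equal_has_full_quarterly_year : Prop := ∀ (observations : List (List (String × String))) (year : Int), Dom_has_full_quarterly_year observations year → Spec_has_full_quarterly_year observations year (has_full_quarterly_year observations year)

-- ===== LEMMAS AND PROOFS =====

-- Any quarter produced by quarter_from_date lies in 1..4.
theorem quarter_mem_range (v : Option String) (y q : Int)
    (h : quarter_from_date v = some (y, q)) : 1 ≤ q ∧ q ≤ 4 := by
  simp only [quarter_from_date] at h
  split_ifs at h with h1 h2
  · rcases hy : PySem.Int.ofChars? _ with _ | year' <;> rw [hy] at h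
    · exact absurd h (by simp)
    rcases hm : PySem.Int.ofChars? _ with _ | month' <;> rw [hm] at h
    · exact absurd h (by simp)
    dsimp only at h
    split_ifs at h with h3
    push Not at h3
    simp only [Option.some.injEq, Prod.mk.injEq] at h
    rcases h with ⟨_, hq⟩
    have he : PySem.Int.floordiv (month' - 1) 3 = (month' - 1) / 3 :=
      PySem.Int.floordiv_eq_ediv_of_pos (by omega)
    rw [he] at hq
    omega

-- The step function of A's loop.
def pvStep (year : Int) (quarters : PySem.Set Int) (row : List (String × String)) : PySem.Set Int :=
  match quarter_from_date ((PySem.Dict.mk row).get? "date") with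
  | none => quarters
  | some (row_year, row_quarter) =>
    if row_year == year then PySem.Set.add quarters row_quarter else quarters

-- Membership in the accumulated set.
theorem mem_foldl_pvStep (year : Int) (obs : List (List (String × String)))
    (s : PySem.Set Int) (x : Int) :
    x ∈ obs.foldl (pvStep year) s ↔
      x ∈ s ∨ ∃ row ∈ obs, quarter_from_date ((PySem.Dict.mk row).get? "date") = some (year, x) := by
  induction obs generalizing s with
  | nil => simp
  | cons r t ih =>
    simp only [List.foldl_cons, ih, List.mem_cons]
    constructor
    · rintro (hs | ⟨row, hr, he⟩)
      · rcases hq : quarter_from_date ((PySem.Dict.mk r).get? "date") with _ | ⟨ry, rq⟩ <;>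
          simp only [pvStep, hq] at hs
        · exact Or.inl hs
        · split_ifs at hs with hy
          · rw [PySem.Set.mem_add] at hs
            rcases hs with hs | rfl
            · exact Or.inl hs
            · exact Or.inr ⟨r, Or.inl rfl, by rw [hq]; simp at hy; rw [hy]⟩
          · exact Or.inl hs
      · exact Or.inr ⟨row, Or.inr hr, he⟩
    · rintro (hs | ⟨row, (rfl | hr), he⟩)
      · left
        rcases hq : quarter_from_date ((PySem.Dict.mk r).get? "date") with _ | ⟨ry, rq⟩ <;>
          simp only [pvStep, hq]
        · exact hs
        · split_ifs with hy
          · exact (PySem.Set.mem_add _ _ _).mpr (Or.inl hs)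
          · exact hs
      · left
        simp only [pvStep, he]
        simp [PySem.Set.mem_add]
      · exact Or.inr ⟨row, hr, he⟩

-- The accumulated set stays duplicate-free.
theorem nodup_foldl_pvStep (year : Int) (obs : List (List (String × String)))
    (s : PySem.Set Int) (hs : s.Nodup) : (obs.foldl (pvStep year) s).Nodup := by
  induction obs generalizing s with
  | nil => exact hs
  | cons r t ih =>
    apply ih
    rcases hq : quarter_from_date ((PySem.Dict.mk r).get? "date") with _ | ⟨ry, rq⟩ <;>
      simp only [pvStep, hq]
    · exact hs
    · split_ifs with hy
      · exact PySem.Set.nodup_add s rq hs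
      · exact hs

-- A nodup list of integers from 1..4 has length 4 iff it contains each of 1,2,3,4.
theorem length_eq_four_iff (l : List Int) (hnd : l.Nodup)
    (hsub : ∀ x ∈ l, 1 ≤ x ∧ x ≤ 4) :
    l.length = 4 ↔ (1 ∈ l ∧ 2 ∈ l ∧ 3 ∈ l ∧ 4 ∈ l) := by
  have hsub' : l.toFinset ⊆ ({1, 2, 3, 4} : Finset Int) := by
    intro x hx
    have := hsub x (List.mem_toFinset.mp hx)
    simp only [Finset.mem_insert, Finset.mem_singleton]
    omega
  have hcard : l.toFinset.card = l.length := List.toFinset_card_of_nodup hnd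
  have hc4 : ({1, 2, 3, 4} : Finset Int).card = 4 := by decide
  constructor
  · intro hlen
    have heq : l.toFinset = ({1, 2, 3, 4} : Finset Int) :=
      Finset.eq_of_subset_of_card_le hsub' (by omega)
    refine ⟨?_, ?_, ?_, ?_⟩ <;>
      · rw [← List.mem_toFinset, heq]; decide
  · rintro ⟨h1, h2, h3, h4⟩
    have heq : ({1, 2, 3, 4} : Finset Int) ⊆ l.toFinset := by
      intro x hx
      simp only [Finset.mem_insert, Finset.mem_singleton] at hx
      rw [List.mem_toFinset]
      rcases hx with rfl | rfl | rfl | rfl <;> assumption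
    have heq' := Finset.Subset.antisymm hsub' heq
    have h2 : l.toFinset.card = 4 := by rw [heq', hc4]
    omega

-- ===== VERDICT (by name: the statement is the Claim_ definition above) =====
theorem has_full_quarterly_year_spec : Claim_equal_has_full_quarterly_year := by
  intro observations year _
  unfold Spec_has_full_quarterly_year has_full_quarterly_year has_full_quarterly_year_alt
  have hfold :
      (observations.foldl
        (fun quarters row =>
          match quarter_from_date ((PySem.Dict.mk row).get? "date") with
          | none => quarters
          | some (row_year, row_quarter) =>
            if row_year == year then PySem.Set.add quarters row_quarter else quarters)
        PySem.Set.empty)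
      = observations.foldl (pvStep year) PySem.Set.empty := rfl
  rw [hfold]
  set l := observations.foldl (pvStep year) PySem.Set.empty with hl
  have hnd : l.Nodup := nodup_foldl_pvStep year observations _ (by simp [PySem.Set.empty])
  have hmem : ∀ x : Int, x ∈ l ↔
      ∃ row ∈ observations, quarter_from_date ((PySem.Dict.mk row).get? "date") = some (year, x) := by
    intro x
    rw [hl, mem_foldl_pvStep]
    simp [PySem.Set.empty]
  have hsub : ∀ x ∈ l, 1 ≤ x ∧ x ≤ 4 := by
    intro x hx
    rcases (hmem x).mp hx with ⟨row, _, he⟩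
    exact quarter_mem_range _ _ _ he
  have hlen := length_eq_four_iff l hnd hsub
  have hB : ∀ q : Int,
      (observations.any (fun row =>
        quarter_from_date ((PySem.Dict.mk row).get? "date") == some (year, q))) = true ↔ q ∈ l := by
    intro q
    rw [hmem q]
    simp [List.any_eq_true]
  rw [Bool.eq_iff_iff]
  simp only [PySem.Set.len, beq_iff_eq, List.all_cons, List.all_nil, Bool.and_true,
    Bool.and_eq_true]
  have hcast : ((l.length : Int) = 4) ↔ l.length = 4 := by omega
  rw [hcast, hlen, hB 1, hB 2, hB 3, hB 4]
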